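-- pv_equiv track=rewrite | github.com/mmdsarhadi/Tournament | model.py | latin_square
-- ===== SOURCE A (Python) =====
-- def length(low, high):
--     return high - low + 1
--
-- def latin_square(low, high):
--     square = []
--
--     row = list(range(low, high + 1))
--
--     if len(row) % 2 == 1:
--         row.reverse()
--
--     for _ in range(length(low, high)):
--         square.append(row.copy())
--         last = [row.pop()]
--         row = last + row
--
--     return square
-- ===== SOURCE B (Python) =====
-- def latin_square(low, high):
--     base = list(range(low, high + 1))
--     if len(base) % 2 == 1:
--         base.reverse()
--     n = len(base)
--     return [[base[(j - i) % n] for j in range(n)] for i in range(n)]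
-- ===== Notes on version B (the rewrite author's own statement) =====
-- stated objective: idiomatic
-- what changed: B replaces A's loop of destructive pop/prepend rotations with a closed-form modular index base[(j - i) % n] inside a nested comprehension, building the square without any list mutation.
import Mathlib
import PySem

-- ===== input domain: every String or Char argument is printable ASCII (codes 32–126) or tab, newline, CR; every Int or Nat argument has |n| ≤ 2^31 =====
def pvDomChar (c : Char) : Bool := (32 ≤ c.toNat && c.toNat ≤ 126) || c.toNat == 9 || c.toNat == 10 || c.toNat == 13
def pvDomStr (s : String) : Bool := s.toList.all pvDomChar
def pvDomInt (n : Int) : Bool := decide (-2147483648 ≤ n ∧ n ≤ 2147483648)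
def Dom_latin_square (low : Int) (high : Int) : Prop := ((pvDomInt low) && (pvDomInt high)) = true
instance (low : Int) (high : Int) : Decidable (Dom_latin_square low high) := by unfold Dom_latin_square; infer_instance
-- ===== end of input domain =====

-- B builds the Latin square by a closed-form modular index base[(j - i) % n] in a nested
-- comprehension, instead of A's loop of destructive pop/prepend rotations (objective: idiomatic).

-- ===== PORT A =====
-- one loop step of A: append a copy of the row, then row = [row.pop()] + row
-- (row.pop() on an empty row would raise in Python; that branch is unreachable since the loop
--  runs exactly len(row) times, and the port keeps the row unchanged there)
def latinStep (st : List (List Int) × List Int) : List (List Int) × List Int :=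
  match PySem.List.pop? st.2 (-1) with
  | some (x, rest) => (st.1 ++ [st.2], x :: rest)
  | none => (st.1 ++ [st.2], st.2)

def latin_square (low : Int) (high : Int) : List (List Int) :=
  let row0 := PySem.List.pyRange low (high + 1) 1
  let row := if row0.length % 2 == 1 then row0.reverse else row0
  ((PySem.List.pyRange 0 (high - low + 1) 1).foldl (fun st _ => latinStep st) ([], row)).1

-- ===== PORT B =====
def latin_square_alt (low : Int) (high : Int) : List (List Int) :=
  let base0 := PySem.List.pyRange low (high + 1) 1
  let base := if base0.length % 2 == 1 then base0.reverse else base0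
  let n : Int := base.length
  (PySem.List.pyRange 0 n 1).map (fun i =>
    (PySem.List.pyRange 0 n 1).map (fun j =>
      PySem.List.pyGetD base (PySem.Int.mod (j - i) n) 0))

-- ===== PRECONDITION & SPEC =====
def Spec_latin_square (low : Int) (high : Int) (out : List (List Int)) : Prop := out = latin_square_alt low high
instance (low : Int) (high : Int) (out : List (List Int)) : Decidable (Spec_latin_square low high out) := by unfold Spec_latin_square; infer_instance

-- ===== CLAIM (what is proved, stated in full; the proofs are below) =====
def Claim_equal_latin_square : Prop := ∀ (low : Int) (high : Int), Dom_latin_square low high → Spec_latin_square low high (latin_square low high)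

-- ===== LEMMAS AND PROOFS =====

-- A's step rotates a nonempty row one place to the right, i.e. left by (length - 1)
theorem latinStep_eq_rotate (sq : List (List Int)) (r : List Int) (h : r ≠ []) :
    latinStep (sq, r) = (sq ++ [r], r.rotate (r.length - 1)) := by
  rcases List.eq_nil_or_concat r with rfl | ⟨ys, x, rfl⟩
  · exact absurd rfl h
  · simp only [List.concat_eq_append]
    unfold latinStep
    rw [PySem.List.pop?_last]
    simp only [Prod.mk.injEq, true_and]
    rw [List.rotate_eq_drop_append_take (by simp)]
    simp

-- the loop invariant: after k steps the square holds the first k right-rotations of base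
theorem latin_loop (base : List Int) (hne : base ≠ []) (k : Nat) :
    (List.range k).foldl (fun st _ => latinStep st) ([], base)
      = ((List.range k).map (fun t => base.rotate (t * (base.length - 1))),
         base.rotate (k * (base.length - 1))) := by
  induction k with
  | zero => simp
  | succ k ih =>
    rw [List.range_succ, List.foldl_append, ih, List.foldl_cons, List.foldl_nil,
      latinStep_eq_rotate _ _ (by simpa using (List.ne_nil_iff_length_pos.mpr
        (by simpa [List.length_rotate] using List.length_pos_of_ne_nil hne)))]
    rw [List.length_rotate, List.rotate_rotate, List.map_append, Prod.mk.injEq]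
    refine ⟨rfl, ?_⟩
    congr 1
    ring

-- a right-rotation by i, read off elementwise, is the modular-index row of B
theorem rotate_eq_modRow (base : List Int) (hne : base ≠ []) (i : Nat) :
    base.rotate (i * (base.length - 1))
      = (List.range base.length).map (fun (j : Nat) =>
          PySem.List.pyGetD base (PySem.Int.mod ((j : Int) - (i : Int)) (base.length : Int)) 0) := by
  have hN : 0 < base.length := List.length_pos_of_ne_nil hne
  apply List.ext_getElem
  · simp
  · intro j h1 h2
    rw [List.getElem_rotate]
    simp only [List.getElem_map, List.getElem_range]
    have hj : j < base.length := by simpa [List.length_rotate] using h1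
    rw [PySem.Int.mod_eq_emod_of_pos (by exact_mod_cast hN)]
    have he0 : (0 : Int) ≤ ((j : Int) - (i : Int)) % (base.length : Int) :=
      Int.emod_nonneg _ (by exact_mod_cast hN.ne')
    have he1 : ((j : Int) - (i : Int)) % (base.length : Int) < (base.length : Int) :=
      Int.emod_lt_of_pos _ (by exact_mod_cast hN)
    rw [PySem.List.pyGetD_eq_getElem base 0 he0 he1]
    congr 1
    -- index arithmetic: (j + i*(N-1)) % N = ((j - i) mod N).toNat
    have hcast : (((j + i * (base.length - 1)) % base.length : Nat) : Int)
        = ((j : Int) - (i : Int)) % (base.length : Int) := by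
      push_cast [Nat.cast_sub hN]
      have : (j : Int) + (i : Int) * ((base.length : Int) - 1)
          = ((j : Int) - (i : Int)) + (base.length : Int) * (i : Int) := by ring
      rw [this, Int.add_mul_emod_self_left]
    omega

-- main per-base equality between A's loop result and B's nested map
theorem latin_core (base : List Int) (n : Int) (hn : n = (base.length : Int)) :
    ((PySem.List.pyRange 0 n 1).foldl (fun st _ => latinStep st) ([], base)).1
      = (PySem.List.pyRange 0 n 1).map (fun i =>
          (PySem.List.pyRange 0 n 1).map (fun j =>
            PySem.List.pyGetD base (PySem.Int.mod (j - i) n) 0)) := by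
  subst hn
  rcases base with _ | ⟨a, rest⟩
  · simp
  · set base := a :: rest with hb
    have hne : base ≠ [] := by simp [hb]
    rw [PySem.List.pyRange_one, List.foldl_map, List.map_map]
    simp only [Int.sub_zero, Int.toNat_natCast]
    rw [latin_loop base hne]
    apply List.map_congr_left
    intro i hi
    rw [rotate_eq_modRow base hne i]
    simp [Function.comp, List.map_map]

-- ===== VERDICT (by name: the statement is the Claim_ definition above) =====
theorem latin_square_spec : Claim_equal_latin_square := by
  intro low high _
  show latin_square low high = latin_square_alt low high
  simp only [latin_square, latin_square_alt]
  by_cases hle : high + 1 ≤ low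
  · -- empty case: both loops/ranges are empty
    have h0 : PySem.List.pyRange low (high + 1) 1 = [] := PySem.List.pyRange_one_eq_nil hle
    have h1 : PySem.List.pyRange 0 (high - low + 1) 1 = [] :=
      PySem.List.pyRange_one_eq_nil (by omega)
    simp [h0, h1]
  · -- nonempty: loop count high - low + 1 equals the length of the (possibly reversed) row
    have hlen : high - low + 1 = ((if (PySem.List.pyRange low (high + 1) 1).length % 2 == 1
        then (PySem.List.pyRange low (high + 1) 1).reverse
        else PySem.List.pyRange low (high + 1) 1).length : Int) := by
      have : (PySem.List.pyRange low (high + 1) 1).length = (high + 1 - low).toNat := by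
        rw [PySem.List.pyRange_one]; simp
      split <;> simp [this] <;> omega
    rw [hlen]
    exact latin_core _ _ rfl
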